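-- pv_equiv track=rewrite | github.com/lvetri16/Proyecto1Calculo | convertor.py | ternario_decimal
-- ===== SOURCE A (Python) =====
-- def invertir(cadena):
--     invertido=""
--     for i in range(len(cadena)-1,-1,-1):
--         invertido+=cadena[i]
--     return invertido
--
-- def ternario_decimal(numero):
--     i=0
--     acum=0
--     lista=[]
--     lista2=[]
--     numerot=invertir(str(numero))
--     while(i<len(str(numero))):
--         lista.append(3**i)
--         i+=1
--     for i in numerot:
--         lista2.append(int(i))
--     for i in range(0,len(lista)):
--         acum+=lista[i]*lista2[i]
--     return acum
-- ===== SOURCE B (Python) =====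
-- def ternario_decimal(numero):
--     acum = 0
--     for c in str(numero):
--         acum = acum * 3 + int(c)
--     return acum
-- ===== Notes on version B (the rewrite author's own statement) =====
-- stated objective: simpler
-- what changed: Replaces A's three passes (string reversal, a power table, and a digit list combined by an indexed sum) with a single left-to-right Horner fold: multiply the accumulator by the base and add the next digit.
import Mathlib
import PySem

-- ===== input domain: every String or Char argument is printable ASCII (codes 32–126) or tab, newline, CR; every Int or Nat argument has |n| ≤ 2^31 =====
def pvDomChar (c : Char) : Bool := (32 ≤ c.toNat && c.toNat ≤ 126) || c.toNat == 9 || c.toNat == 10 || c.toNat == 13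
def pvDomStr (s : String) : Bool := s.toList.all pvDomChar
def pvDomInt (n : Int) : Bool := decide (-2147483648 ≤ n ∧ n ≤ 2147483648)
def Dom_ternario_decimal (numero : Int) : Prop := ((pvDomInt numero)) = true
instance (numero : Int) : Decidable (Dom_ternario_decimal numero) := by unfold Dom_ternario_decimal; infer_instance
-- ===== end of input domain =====

-- B replaces A's three passes (string reversal, power table, digit list, indexed sum) with one Horner fold; objective: simpler.

-- ===== PORT A =====
-- helper invertir(cadena): builds the reversed string char by char (Python strings ported as List Char)
def invertir (cadena : List Char) : List Char :=
  (PySem.List.pyRange ((cadena.length : Int) - 1) (-1) (-1)).foldl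
    (fun invertido i => invertido ++ [PySem.List.pyGetD cadena i ' ']) []

def ternario_decimal (numero : Int) : Int :=
  let s := PySem.Int.toChars numero
  let numerot := invertir s
  -- while i < len(str(numero)): lista.append(3**i); i += 1
  let lista : List Int := (List.range s.length).foldl (fun l i => l ++ [(3 : Int) ^ i]) []
  -- for i in numerot: lista2.append(int(i))  — int('-') raises ValueError: only reachable outside Pre_
  let lista2 : List Int := numerot.foldl (fun l c => l ++ [(PySem.Int.ofChars? [c]).getD 0]) []
  -- for i in range(0, len(lista)): acum += lista[i]*lista2[i]
  (PySem.List.pyRange 0 (lista.length : Int) 1).foldl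
    (fun acum i => acum + PySem.List.pyGetD lista i 0 * PySem.List.pyGetD lista2 i 0) 0

-- ===== PORT B =====
def ternario_decimal_alt (numero : Int) : Int :=
  (PySem.Int.toChars numero).foldl
    (fun acum c => acum * 3 + (PySem.Int.ofChars? [c]).getD 0) 0

-- ===== PRECONDITION & SPEC =====
-- Pre_ excludes negative numero: str(numero) then starts with '-', so int('-') raises ValueError in both A and B.
def Pre_ternario_decimal (numero : Int) : Prop := 0 ≤ numero
instance (numero : Int) : Decidable (Pre_ternario_decimal numero) := by unfold Pre_ternario_decimal; infer_instance
def pvWitness_ternario_decimal : Int := 1202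

def Spec_ternario_decimal (numero : Int) (out : Int) : Prop := out = ternario_decimal_alt numero
instance (numero : Int) (out : Int) : Decidable (Spec_ternario_decimal numero out) := by unfold Spec_ternario_decimal; infer_instance

-- ===== CLAIM (what is proved, stated in full; the proofs are below) =====
def Claim_equal_ternario_decimal : Prop := ∀ (numero : Int), Dom_ternario_decimal numero → Pre_ternario_decimal numero → Spec_ternario_decimal numero (ternario_decimal numero)

-- ===== LEMMAS AND PROOFS =====

-- digit value of one char, as both ports compute it
def pvDig (c : Char) : Int := (PySem.Int.ofChars? [c]).getD 0

lemma invertir_eq_reverse (cadena : List Char) : invertir cadena = cadena.reverse := by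
  unfold invertir
  rw [PySem.List.pyRange_neg_one_eq_reverse]
  rw [PySem.List.foldl_append_singleton_eq_map]
  norm_num
  exact PySem.List.map_pyGetD_pyRange_zero' cadena ' '

-- A's positional sum over the reversed digit string equals B's Horner fold
lemma horner_sum (ds : List Char) :
    ((List.range ds.length).map
        (fun k => (3 : Int) ^ k * pvDig (ds.reverse.getD k ' '))).sum
      = ds.foldl (fun acum c => acum * 3 + pvDig c) 0 := by
  induction ds using List.reverseRecOn with
  | nil => simp
  | append_singleton ds c ih =>
    rw [List.foldl_append, ← ih]
    simp only [List.length_append, List.length_singleton, List.reverse_append,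
      List.reverse_singleton, List.singleton_append, List.range_succ_eq_map,
      List.map_cons, List.map_map, List.sum_cons, List.getD_cons_zero, pow_zero, one_mul]
    rw [show ((fun k => (3:Int) ^ k * pvDig ((c :: ds.reverse).getD k ' ')) ∘ Nat.succ)
        = fun k => ((3:Int) ^ k * pvDig (ds.reverse.getD k ' ')) * 3 by
      funext k
      simp only [Function.comp, List.getD_cons_succ, pow_succ]
      ring]
    rw [List.sum_map_mul_right]
    simp only [List.foldl_cons, List.foldl_nil]
    ring

theorem ternario_decimal_eq (numero : Int) :
    ternario_decimal numero = ternario_decimal_alt numero := by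
  simp only [ternario_decimal, ternario_decimal_alt]
  set ds := PySem.Int.toChars numero with hds
  rw [invertir_eq_reverse]
  rw [PySem.List.foldl_append_singleton_eq_map, PySem.List.foldl_append_singleton_eq_map]
  simp only [List.nil_append, List.length_map, List.length_range]
  rw [PySem.List.pyRange_zero_nat]
  rw [List.foldl_map]
  rw [PySem.List.foldl_add (g := fun (k : Nat) =>
    PySem.List.pyGetD ((List.range ds.length).map (fun i => (3:Int) ^ i)) (k:Int) 0 *
    PySem.List.pyGetD (ds.reverse.map (fun c => (PySem.Int.ofChars? [c]).getD 0)) (k:Int) 0)]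
  rw [List.map_congr_left (g := fun k => (3:Int) ^ k * pvDig (ds.reverse.getD k ' ')) ?_]
  · rw [horner_sum]; ring_nf; rfl
  · intro k hk
    have hk' : k < ds.length := List.mem_range.mp hk
    have hk2 : k < ds.reverse.length := by simpa using hk'
    rw [PySem.List.pyGetD_natCast, PySem.List.pyGetD_natCast]
    rw [List.getD_eq_getElem _ _ (by simpa using hk'), List.getD_eq_getElem _ _ (by simpa using hk')]
    simp [List.getElem_map, pvDig, List.getElem?_eq_getElem hk2, List.getElem_reverse]

-- ===== VERDICT (by name: the statement is the Claim_ definition above) =====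
theorem ternario_decimal_spec : Claim_equal_ternario_decimal := by
  intro numero _ _
  exact ternario_decimal_eq numero
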